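-- pv_equiv track=rewrite | github.com/syurskyi/Python_Topics | 125_algorithms/_examples/_algorithms_challenges/pybites/intermediate/118_v2/duplicates.py | get_duplicate_indices
-- ===== SOURCE A (Python) =====
-- from collections import defaultdict
--
-- def get_duplicate_indices(words):
--     """Given a list of words, loop through the words and check for each
--        word if it occurs more than once.
--        If so return the index of its first occurrence.
--        For example in the following list 'is' and 'it'
--        occur more than once, and they are at indices 0 and 1 so you would
--        return [0, 1]:
--        ['is', 'it', 'true', 'or', 'is', 'it', 'not?'] => [0, 1]
--        Make sure the returning list is unique and sorted in ascending order."""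
--
--     result = set()
--
--
--     occurences = defaultdict(int)
--
--     for i,word in enumerate(words):
--         if word in occurences:
--             result.add(occurences[word])
--         else:
--             occurences[word] = i
--
--
--
--     return sorted(result)
-- ===== SOURCE B (Python) =====
-- from collections import Counter
--
-- def get_duplicate_indices(words):
--     counts = Counter(words)
--     first = {}
--     for i, word in enumerate(words):
--         if word not in first:
--             first[word] = i
--     return sorted(idx for word, idx in first.items() if counts[word] > 1)
-- ===== Notes on version B (the rewrite author's own statement) =====
-- stated objective: alternative
-- what changed: B separates tallying from selection: it builds a full Counter of the words and a first-occurrence index dict in independent passes, then filters the first-index table by count > 1 and sorts, instead of A's single stateful pass that detects a duplicate inline and accumulates indices into a set.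
import Mathlib
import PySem

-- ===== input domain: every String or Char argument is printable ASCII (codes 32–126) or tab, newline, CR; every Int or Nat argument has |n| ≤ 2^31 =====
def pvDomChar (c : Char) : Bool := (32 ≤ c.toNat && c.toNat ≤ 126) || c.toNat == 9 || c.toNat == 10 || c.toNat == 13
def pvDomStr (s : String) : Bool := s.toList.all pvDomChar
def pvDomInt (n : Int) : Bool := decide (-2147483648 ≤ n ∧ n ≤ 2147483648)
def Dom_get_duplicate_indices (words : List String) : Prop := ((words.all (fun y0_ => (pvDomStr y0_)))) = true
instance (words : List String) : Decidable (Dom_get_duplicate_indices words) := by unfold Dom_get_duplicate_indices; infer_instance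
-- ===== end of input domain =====

-- B separates tallying from selection (full Counter pass + first-index pass, then filter and sort) instead of A's single inline duplicate-detecting pass; same cost, different decomposition.

-- ===== PORT A =====
-- one pass: result = set of first indices of already-seen words; occurences : word -> first index
def get_duplicate_indices (words : List String) : List Int :=
  let st := (PySem.List.enumerate words 0).foldl
    (fun (st : PySem.Set Int × PySem.Dict String Int) p =>
      if st.2.contains p.2 then (PySem.Set.add st.1 (st.2.getD p.2 0), st.2)
      else (st.1, st.2.insert p.2 p.1))
    (PySem.Set.empty, PySem.Dict.empty)
  PySem.List.sorted st.1 (fun x => x) false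

-- ===== PORT B =====
-- two independent passes (full Counter, first-occurrence dict), then filter the table by count > 1 and sort
def get_duplicate_indices_alt (words : List String) : List Int :=
  let counts := PySem.Dict.counter words
  let first := (PySem.List.enumerate words 0).foldl
    (fun (d : PySem.Dict String Int) p => if d.contains p.2 then d else d.insert p.2 p.1)
    PySem.Dict.empty
  PySem.List.sorted
    ((first.items.filter (fun p => decide (counts.getD p.1 0 > 1))).map (·.2))
    (fun x => x) false

-- ===== PRECONDITION & SPEC =====
def Spec_get_duplicate_indices (words : List String) (out : List Int) : Prop := out = get_duplicate_indices_alt words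
instance (words : List String) (out : List Int) : Decidable (Spec_get_duplicate_indices words out) := by unfold Spec_get_duplicate_indices; infer_instance

-- ===== CLAIM (what is proved, stated in full; the proofs are below) =====
def Claim_equal_get_duplicate_indices : Prop := ∀ (words : List String), Dom_get_duplicate_indices words → Spec_get_duplicate_indices words (get_duplicate_indices words)

-- ===== LEMMAS AND PROOFS =====

-- A's loop step and B's first-dict loop step, named for the proofs
def stepA (st : PySem.Set Int × PySem.Dict String Int) (p : Int × String) :
    PySem.Set Int × PySem.Dict String Int :=
  if st.2.contains p.2 then (PySem.Set.add st.1 (st.2.getD p.2 0), st.2)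
  else (st.1, st.2.insert p.2 p.1)

def stepB (d : PySem.Dict String Int) (p : Int × String) : PySem.Dict String Int :=
  if d.contains p.2 then d else d.insert p.2 p.1

lemma foldB_get? (e : List (Int × String)) (d : PySem.Dict String Int) (w : String) :
    (e.foldl stepB d).get? w =
      if d.contains w then d.get? w
      else (e.find? (fun p => p.2 == w)).map (·.1) := by
  induction e generalizing d with
  | nil =>
      by_cases h : d.contains w
      · simp [h]
      · simp only [List.foldl_nil, List.find?_nil, Option.map_none, if_neg h]
        rw [PySem.Dict.get?_eq_none_iff_not_mem_keys]
        intro hm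
        exact h ((PySem.Dict.contains_iff_mem_keys _ _).mpr hm)
  | cons p rest ih =>
      by_cases hw : p.2 = w
      · subst hw
        rw [List.find?_cons_of_pos (by simp)]
        simp only [List.foldl_cons, stepB]
        by_cases h : d.contains p.2
        · rw [if_pos h, ih, if_pos h, if_pos h]
        · rw [if_neg h, ih, if_pos (by simp [PySem.Dict.contains_insert_self]), if_neg h]
          simp [PySem.Dict.get?_insert_self]
      · rw [List.find?_cons_of_neg (by simp [hw])]
        simp only [List.foldl_cons, stepB]
        by_cases h : d.contains p.2
        · rw [if_pos h, ih]
        · rw [if_neg h, ih]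
          have hc : (d.insert p.2 p.1).contains w = d.contains w := by
            simp [PySem.Dict.contains_insert, beq_iff_eq, Ne.symm hw]
          rw [hc]
          by_cases h2 : d.contains w
          · rw [if_pos h2, if_pos h2, PySem.Dict.get?_insert, if_neg (Ne.symm hw)]
          · rw [if_neg h2, if_neg h2]

lemma nodupA (e : List (Int × String)) (r : PySem.Set Int) (d : PySem.Dict String Int)
    (hr : r.Nodup) : (e.foldl stepA (r, d)).1.Nodup := by
  induction e generalizing r d with
  | nil => exact hr
  | cons p rest ih =>
      simp only [List.foldl_cons, stepA]
      by_cases h : d.contains p.2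
      · rw [if_pos h]; exact ih _ _ (PySem.Set.nodup_add _ _ hr)
      · rw [if_neg h]; exact ih _ _ hr

lemma memA (e : List (Int × String)) (r : PySem.Set Int) (d : PySem.Dict String Int) (x : Int) :
    x ∈ (e.foldl stepA (r, d)).1 ↔ x ∈ r ∨ ∃ w : String,
      (if d.contains w then ((e.map (·.2)).count w ≥ 1 ∧ x = d.getD w 0)
       else ((e.map (·.2)).count w ≥ 2 ∧ (e.find? (fun p => p.2 == w)).map (·.1) = some x)) := by
  induction e generalizing r d with
  | nil =>
      simp only [List.foldl_nil, List.map_nil, List.count_nil, List.find?_nil, Option.map_none]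
      constructor
      · exact fun h => Or.inl h
      · rintro (h | ⟨w, hw⟩)
        · exact h
        · split at hw
          · exact absurd hw.1 (by omega)
          · exact absurd hw.2 (by simp)
  | cons p rest ih =>
      simp only [List.foldl_cons, stepA, List.map_cons]
      by_cases h : d.contains p.2
      · rw [if_pos h, ih, PySem.Set.mem_add]
        constructor
        · rintro ((hr | hxv) | ⟨w, hw⟩)
          · exact Or.inl hr
          · refine Or.inr ⟨p.2, ?_⟩
            rw [if_pos h]
            exact ⟨by simp, hxv⟩
          · refine Or.inr ⟨w, ?_⟩
            by_cases hc : d.contains w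
            · rw [if_pos hc] at hw ⊢
              exact ⟨by simp only [List.count_cons]; omega, hw.2⟩
            · rw [if_neg hc] at hw ⊢
              have hne : p.2 ≠ w := fun hh => hc (hh ▸ h)
              refine ⟨?_, ?_⟩
              · simpa [List.count_cons, hne] using hw.1
              · rw [List.find?_cons_of_neg (by simp [hne])]; exact hw.2
        · rintro (hr | ⟨w, hw⟩)
          · exact Or.inl (Or.inl hr)
          · by_cases hc : d.contains w
            · rw [if_pos hc] at hw
              by_cases hwp : w = p.2
              · subst hwp; exact Or.inl (Or.inr hw.2)
              · refine Or.inr ⟨w, ?_⟩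
                rw [if_pos hc]
                have hne : p.2 ≠ w := fun hh => hwp hh.symm
                exact ⟨by have := hw.1; simpa [List.count_cons, hne] using this, hw.2⟩
            · rw [if_neg hc] at hw
              have hne : p.2 ≠ w := fun hh => hc (hh ▸ h)
              refine Or.inr ⟨w, ?_⟩
              rw [if_neg hc]
              refine ⟨by have := hw.1; simpa [List.count_cons, hne] using this, ?_⟩
              have := hw.2
              rwa [List.find?_cons_of_neg (by simp [hne])] at this
      · rw [if_neg h, ih]
        have hkey : ∀ w : String, w ≠ p.2 →
            ((d.insert p.2 p.1).contains w = d.contains w ∧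
             (d.insert p.2 p.1).getD w 0 = d.getD w 0) := by
          intro w hwne
          constructor
          · simp [PySem.Dict.contains_insert, beq_iff_eq, hwne]
          · rw [PySem.Dict.getD_insert]; simp [hwne]
        constructor
        · rintro (hr | ⟨w, hw⟩)
          · exact Or.inl hr
          · by_cases hwp : w = p.2
            · subst hwp
              rw [if_pos (by simp [PySem.Dict.contains_insert_self])] at hw
              refine Or.inr ⟨p.2, ?_⟩
              rw [if_neg h]
              refine ⟨by have h1 := hw.1; simp only [List.count_cons, beq_self_eq_true, if_true]; omega, ?_⟩
              rw [List.find?_cons_of_pos (by simp)]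
              simp only [Option.map_some]
              rw [PySem.Dict.getD_insert_self] at hw
              rw [hw.2]
            · obtain ⟨hc, hg⟩ := hkey w hwp
              refine Or.inr ⟨w, ?_⟩
              have hne : p.2 ≠ w := fun hh => hwp hh.symm
              by_cases hcd : d.contains w
              · rw [hc, if_pos hcd, hg] at hw
                rw [if_pos hcd]
                exact ⟨by have := hw.1; simpa [List.count_cons, hne] using this, hw.2⟩
              · rw [hc, if_neg hcd] at hw
                rw [if_neg hcd]
                refine ⟨by have := hw.1; simpa [List.count_cons, hne] using this, ?_⟩
                rw [List.find?_cons_of_neg (by simp [hne])]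
                exact hw.2
        · rintro (hr | ⟨w, hw⟩)
          · exact Or.inl hr
          · by_cases hwp : w = p.2
            · subst hwp
              rw [if_neg h] at hw
              refine Or.inr ⟨p.2, ?_⟩
              rw [if_pos (by simp [PySem.Dict.contains_insert_self]), PySem.Dict.getD_insert_self]
              refine ⟨by have h1 := hw.1; simp only [List.count_cons, beq_self_eq_true, if_true] at h1; omega, ?_⟩
              have := hw.2
              rw [List.find?_cons_of_pos (by simp)] at this
              simp only [Option.map_some, Option.some.injEq] at this
              omega
            · obtain ⟨hc, hg⟩ := hkey w hwp
              refine Or.inr ⟨w, ?_⟩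
              have hne : p.2 ≠ w := fun hh => hwp hh.symm
              by_cases hcd : d.contains w
              · rw [if_pos hcd] at hw
                rw [hc, if_pos hcd, hg]
                exact ⟨by have := hw.1; simpa [List.count_cons, hne] using this, hw.2⟩
              · rw [if_neg hcd] at hw
                rw [hc, if_neg hcd]
                refine ⟨by have := hw.1; simpa [List.count_cons, hne] using this, ?_⟩
                have := hw.2
                rwa [List.find?_cons_of_neg (by simp [hne])] at this

lemma foldB_keys_nodup (e : List (Int × String)) (d : PySem.Dict String Int)
    (h : d.keys.Nodup) : (e.foldl stepB d).keys.Nodup := by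
  induction e generalizing d with
  | nil => exact h
  | cons p rest ih =>
      simp only [List.foldl_cons, stepB]
      by_cases hc : d.contains p.2
      · rw [if_pos hc]; exact ih _ h
      · rw [if_neg hc]
        refine ih _ ?_
        rw [PySem.Dict.keys_insert_of_not_contains _ _ (by simpa using hc)]
        refine List.Nodup.append h (List.nodup_singleton _) ?_
        intro x hx hy
        simp at hy; subst hy
        exact hc ((PySem.Dict.contains_iff_mem_keys _ _).mpr hx)

lemma foldB_values (ws : List String) (s : Int) (d : PySem.Dict String Int)
    (hnd : d.values.Nodup) (hlt : ∀ v ∈ d.values, v < s) :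
    ((PySem.List.enumerate ws s).foldl stepB d).values.Nodup ∧
      ∀ v ∈ ((PySem.List.enumerate ws s).foldl stepB d).values, v < s + ws.length := by
  induction ws generalizing s d with
  | nil => exact ⟨hnd, by simpa using hlt⟩
  | cons w rest ih =>
      rw [PySem.List.enumerate_cons]
      simp only [List.foldl_cons, stepB]
      by_cases hc : d.contains w
      · rw [if_pos hc]
        have := ih (s + 1) d hnd (fun v hv => lt_trans (hlt v hv) (by omega))
        refine ⟨this.1, fun v hv => ?_⟩
        have := this.2 v hv
        simp only [List.length_cons] at *
        push_cast at *
        omega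
      · rw [if_neg hc]
        have hvals : (d.insert w s).values = d.values ++ [s] := by
          simp only [PySem.Dict.values, PySem.Dict.items_insert_of_not_contains _ _ (by simpa using hc)]
          simp
        have hnd' : (d.insert w s).values.Nodup := by
          rw [hvals]
          refine List.Nodup.append hnd (List.nodup_singleton _) ?_
          intro x hx hy
          simp at hy; subst hy
          exact absurd rfl (ne_of_lt (hlt _ hx))
        have hlt' : ∀ v ∈ (d.insert w s).values, v < s + 1 := by
          rw [hvals]; intro v hv
          rcases List.mem_append.mp hv with h1 | h1
          · exact lt_trans (hlt v h1) (by omega)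
          · simp at h1; omega
        have := ih (s + 1) _ hnd' hlt'
        refine ⟨this.1, fun v hv => ?_⟩
        have := this.2 v hv
        simp only [List.length_cons] at *
        push_cast at *
        omega

-- ===== VERDICT (by name: the statement is the Claim_ definition above) =====
theorem get_duplicate_indices_spec : Claim_equal_get_duplicate_indices := by
  intro words _
  show get_duplicate_indices words = get_duplicate_indices_alt words

  unfold get_duplicate_indices get_duplicate_indices_alt
  have hA : (fun (st : PySem.Set Int × PySem.Dict String Int) (p : Int × String) =>
      if st.2.contains p.2 then (PySem.Set.add st.1 (st.2.getD p.2 0), st.2)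
      else (st.1, st.2.insert p.2 p.1)) = stepA := rfl
  have hB : (fun (d : PySem.Dict String Int) (p : Int × String) =>
      if d.contains p.2 then d else d.insert p.2 p.1) = stepB := rfl
  rw [hA, hB]
  set e := PySem.List.enumerate words 0 with he
  set S := (e.foldl stepA (PySem.Set.empty, PySem.Dict.empty)).1 with hSdef
  set first := e.foldl stepB PySem.Dict.empty with hF
  set L := (first.items.filter
      (fun p => decide ((PySem.Dict.counter words).getD p.1 0 > 1))).map (·.2) with hL
  -- first-dict lookup = first occurrence index
  have hget : ∀ w : String, first.get? w = (e.find? (fun p => p.2 == w)).map (·.1) := by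
    intro w
    rw [hF, foldB_get?]
    simp [PySem.Dict.contains_empty]
  -- membership of S
  have hSmem : ∀ x : Int, x ∈ S ↔ ∃ w : String,
      words.count w ≥ 2 ∧ (e.find? (fun p => p.2 == w)).map (·.1) = some x := by
    intro x
    rw [hSdef, memA]
    have hm : e.map (·.2) = words := PySem.List.map_snd_enumerate words 0
    simp only [PySem.Dict.contains_empty, if_neg Bool.false_ne_true, hm]
    simp [PySem.Set.empty]
  -- membership of L
  have hLmem : ∀ x : Int, x ∈ L ↔ ∃ w : String,
      words.count w ≥ 2 ∧ first.get? w = some x := by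
    intro x
    rw [hL]
    simp only [List.mem_map, List.mem_filter]
    constructor
    · rintro ⟨p, ⟨hpi, hpc⟩, hpx⟩
      refine ⟨p.1, ?_, ?_⟩
      · have hcnt := PySem.Dict.getD_counter words p.1
        simp only [decide_eq_true_eq] at hpc
        rw [hcnt] at hpc
        omega
      · have hkn := foldB_keys_nodup e PySem.Dict.empty PySem.Dict.nodup_keys_empty
        have := PySem.Dict.get?_of_mem_items _ hpi hkn
        rwa [hpx] at this
    · rintro ⟨w, hc, hg⟩
      refine ⟨(w, x), ⟨?_, ?_⟩, rfl⟩
      · exact PySem.Dict.mem_items_of_get?_eq_some _ hg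
      · have hcnt := PySem.Dict.getD_counter words w
        simp only [decide_eq_true_eq]
        rw [hcnt]
        omega
  -- nodups
  have hSnd : S.Nodup := nodupA e _ _ List.nodup_nil
  have hLnd : L.Nodup := by
    have hv := (foldB_values words 0 PySem.Dict.empty (by simp [PySem.Dict.values, PySem.Dict.empty]) (by simp [PySem.Dict.values, PySem.Dict.empty])).1
    have hsub : L.Sublist first.values := by
      rw [hL]
      exact List.Sublist.map _ List.filter_sublist
    exact hv.sublist hsub
  -- perm and sorted
  have hperm : S.Perm L := by
    rw [List.perm_ext_iff_of_nodup hSnd hLnd]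
    intro x
    rw [hSmem, hLmem]
    constructor
    · rintro ⟨w, h1, h2⟩; exact ⟨w, h1, (hget w).symm ▸ h2⟩
    · rintro ⟨w, h1, h2⟩; rw [hget w] at h2; exact ⟨w, h1, h2⟩
  exact PySem.List.sorted_eq_sorted_of_perm S L (fun x => x) (fun a b h => h) hperm
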